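-- pv_equiv track=rewrite | github.com/rdancer/brute-lee | compress.py | substring_compress_aggressive
-- ===== SOURCE A (Python) =====
-- def substring_compress_aggressive(code_book, message):
--     """replaces substrings from message that match a substring in code_book with a compressed representation of the substring in the form <index,length> where index is the index of the substring in code_book and length is the length of the substring in code_book. The compressor will aggressively replace any substring that is found in the code_book, even if the compressed representation is longer than the original substring -- this should make the result more compressible with a general compression algorithm such as Deflate or LZMA."""
--     compressed_message = ''
--     current = ''
--
--     for c in message:
--         current += c
--
--         if current not in code_book:
--             compressed = f'<{code_book.index(current[:-1])},{len(current) - 1}>'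
--             compressed_message += compressed
--             if c == '<':
--                 compressed_message += '<'
--             compressed_message += c
--             current = ''
--
--     if len(current) > 0:
--         compressed = f'<{code_book.index(current)},{len(current)}>'
--         compressed_message += compressed
--
--     return compressed_message
-- ===== SOURCE B (Python) =====
-- def substring_compress_aggressive(code_book, message):
--     # Occurrence-list filtering: keep the start positions in code_book where the
--     # current run occurs (seeded from a precomputed per-character position index)
--     # and narrow the list by one character at a time; its first element is the
--     # run's first-occurrence index.
--     n = len(code_book)
--     pos = {}
--     for p, ch in enumerate(code_book):
--         pos.setdefault(ch, []).append(p)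
--     out = []
--     occs = []
--     k = 0
--     for c in message:
--         new_occs = pos.get(c, []) if k == 0 else [p for p in occs if p + k < n and code_book[p + k] == c]
--         if new_occs:
--             occs = new_occs
--             k += 1
--         else:
--             out.append(f'<{occs[0] if k else 0},{k}>')
--             if c == '<':
--                 out.append('<')
--             out.append(c)
--             occs = []
--             k = 0
--     if k > 0:
--         out.append(f'<{occs[0]},{k}>')
--     return ''.join(out)
-- ===== Notes on version B (the rewrite author's own statement) =====
-- stated objective: alternative
-- what changed: B replaces A's per-character substring re-search of code_book ('current in code_book' plus code_book.index on every emit) by a precomputed per-character position index and an incrementally filtered list of occurrence start positions whose first element is the first-occurrence index, so no substring search is ever performed.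
import Mathlib
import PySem

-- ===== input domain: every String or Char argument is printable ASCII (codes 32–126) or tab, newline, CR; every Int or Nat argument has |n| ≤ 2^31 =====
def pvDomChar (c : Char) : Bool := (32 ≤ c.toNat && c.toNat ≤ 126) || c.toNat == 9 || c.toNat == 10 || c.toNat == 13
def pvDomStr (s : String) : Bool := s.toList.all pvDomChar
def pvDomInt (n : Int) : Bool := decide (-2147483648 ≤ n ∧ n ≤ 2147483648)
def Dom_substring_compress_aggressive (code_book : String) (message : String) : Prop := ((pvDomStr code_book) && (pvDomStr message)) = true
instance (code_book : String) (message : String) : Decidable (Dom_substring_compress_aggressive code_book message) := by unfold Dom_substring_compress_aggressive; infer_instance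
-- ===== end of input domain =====

-- B replaces A's per-character substring re-search of code_book by an incrementally
-- filtered list of occurrence start positions (objective: alternative algorithm, same results).

-- ===== PORT A =====
-- f'<{idx},{len}>' (shared by both ports: both Pythons build the identical f-string)
def pvTok (idx : Int) (len : Int) : List Char :=
  '<' :: (PySem.Int.toChars idx ++ ',' :: PySem.Int.toChars len ++ ['>'])

-- one iteration of A's `for c in message` loop; state = (compressed_message, current).
-- Python's code_book.index(...) raises when absent; on every reached input the needle is
-- present (current[:-1] is always '' or a substring of code_book), so PySem.Chars.find is exact here.
def pvAStep (cb : List Char) (st : List Char × List Char) (c : Char) : List Char × List Char :=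
  let cur := st.2 ++ [c]
  if PySem.Chars.isIn cur cb then (st.1, cur)
  else
    let comp := pvTok (PySem.Chars.find cb (PySem.List.slice cur none (some (-1)))) ((cur.length : Int) - 1)
    (st.1 ++ comp ++ (if c = '<' then ['<'] else []) ++ [c], [])

def substring_compress_aggressive (code_book : String) (message : String) : String :=
  let st := message.toList.foldl (pvAStep code_book.toList) ([], [])
  String.ofList (if st.2.length > 0
    then st.1 ++ pvTok (PySem.Chars.find code_book.toList st.2) (st.2.length : Int)
    else st.1)

-- ===== PORT B =====
-- Source B's position index: `for p, ch in enumerate(code_book): pos.setdefault(ch, []).append(p)`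
-- (setdefault(..).append(p) stores pos[ch] = pos.get(ch, []) + [p]; indices are the Nat positions of zipIdx)
def pvBIndex (cb : List Char) : PySem.Dict Char (List Nat) :=
  cb.zipIdx.foldl (fun pos pc => pos.insert pc.1 (pos.getD pc.1 [] ++ [pc.2])) PySem.Dict.empty

-- one iteration of Source B's `for c in message` loop; state = (out, occs, k).
-- Python's occs[0] raises on an empty list; it is only read with k > 0, where occs is
-- nonempty (invariant of Source B), so List.headD 0 is exact here.
def pvBStep (cb : List Char) (pos : PySem.Dict Char (List Nat))
    (st : List Char × List Nat × Nat) (c : Char) : List Char × List Nat × Nat :=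
  let occs := st.2.1
  let k := st.2.2
  let newOccs := if k = 0 then pos.getD c []
    else occs.filter (fun p => decide (p + k < cb.length) && (cb[p + k]? == some c))
  if newOccs.isEmpty = false then (st.1, newOccs, k + 1)
  else
    (st.1 ++ pvTok (if k = 0 then (0 : Int) else ((occs.headD 0 : Nat) : Int)) ((k : Nat) : Int)
          ++ (if c = '<' then ['<'] else []) ++ [c],
     [], 0)

def substring_compress_aggressive_alt (code_book : String) (message : String) : String :=
  let cb := code_book.toList
  let pos := pvBIndex cb
  let st := message.toList.foldl (pvBStep cb pos) ([], [], 0)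
  String.ofList (if st.2.2 > 0
    then st.1 ++ pvTok ((st.2.1.headD 0 : Nat) : Int) ((st.2.2 : Nat) : Int)
    else st.1)

-- ===== PRECONDITION & SPEC =====
def Spec_substring_compress_aggressive (code_book : String) (message : String) (out : String) : Prop := out = substring_compress_aggressive_alt code_book message
instance (code_book : String) (message : String) (out : String) : Decidable (Spec_substring_compress_aggressive code_book message out) := by unfold Spec_substring_compress_aggressive; infer_instance

-- ===== CLAIM (what is proved, stated in full; the proofs are below) =====
def Claim_equal_substring_compress_aggressive : Prop := ∀ (code_book : String) (message : String), Dom_substring_compress_aggressive code_book message → Spec_substring_compress_aggressive code_book message (substring_compress_aggressive code_book message)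

-- ===== LEMMAS AND PROOFS =====

-- the coupling invariant between A's state (msg, cur) and B's state (out, occs, k)
def pvInv (cb : List Char) (a : List Char × List Char) (b : List Char × List Nat × Nat) : Prop :=
  b.1 = a.1 ∧ b.2.2 = a.2.length ∧
  (a.2 ≠ [] →
    b.2.1 = (List.range (cb.length + 1)).filter (fun p => decide (a.2 <+: cb.drop p))) ∧
  (a.2 = [] ∨ a.2 <:+: cb)

lemma pv_append_prefix_iff (cur : List Char) (c : Char) (l : List Char) :
    (cur ++ [c]) <+: l ↔ cur <+: l ∧ l[cur.length]? = some c := by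
  constructor
  · rintro ⟨t, ht⟩
    subst ht
    refine ⟨⟨c :: t, by simp⟩, ?_⟩
    simp
  · rintro ⟨⟨t, ht⟩, hg⟩
    subst ht
    rw [List.getElem?_append_right (le_refl _)] at hg
    simp only [Nat.sub_self] at hg
    cases t with
    | nil => simp at hg
    | cons x t' =>
      simp only [List.getElem?_cons_zero, Option.some.injEq] at hg
      subst hg
      exact ⟨t', by simp⟩

lemma pv_filter_range_head (q : Nat → Bool) (m j : Nat) (hj : j < m) (hq : q j = true)
    (hmin : ∀ i, i < j → q i = false) :
    ((List.range m).filter q).headD 0 = j := by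
  obtain ⟨r, hr⟩ : ∃ r, m = (j + 1) + r := ⟨m - (j + 1), by omega⟩
  subst hr
  rw [List.range_add, List.filter_append, List.range_succ, List.filter_append]
  have h1 : (List.range j).filter q = [] := by
    rw [List.filter_eq_nil_iff]
    intro a ha
    simp only [List.mem_range] at ha
    simp [hmin a ha]
  simp [h1, hq]

-- infix of cb ↔ the filtered occurrence list is nonempty
lemma pv_filter_range_ne_nil (cb cur : List Char) :
    ((List.range (cb.length + 1)).filter (fun p => decide (cur <+: cb.drop p))) ≠ [] ↔
      cur <:+: cb := by
  rw [Ne, List.filter_eq_nil_iff]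
  push Not
  constructor
  · rintro ⟨p, hp, hd⟩
    simp only [decide_eq_true_eq] at hd
    exact (List.prefix_iff_eq_take.mp hd).symm ▸ (hd.isInfix.trans (List.drop_suffix p cb).isInfix)
  · intro h
    obtain ⟨j, hj⟩ := (PySem.Chars.exists_prefix_drop_iff_isIn cur cb).symm.mp
      ((PySem.Chars.isIn_iff_infix cur cb).mpr h)
    by_cases hjm : j < cb.length + 1
    · exact ⟨j, List.mem_range.mpr hjm, by simp [hj]⟩
    · have hd : cb.drop j = [] := List.drop_eq_nil_of_le (by omega)
      rw [hd, List.prefix_nil] at hj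
      exact ⟨0, List.mem_range.mpr (by omega), by simp [hj]⟩

-- find = head of the filtered occurrence list (cur an infix of cb)
lemma pv_find_eq_head (cb cur : List Char) (h : cur <:+: cb) :
    PySem.Chars.find cb cur =
      ((((List.range (cb.length + 1)).filter (fun p => decide (cur <+: cb.drop p))).headD 0 : Nat) : Int) := by
  have hnn : 0 ≤ PySem.Chars.find cb cur := (PySem.Chars.find_nonneg_iff cb cur).mpr h
  obtain ⟨hpre, hmin⟩ := PySem.Chars.find_spec hnn
  have hle : PySem.Chars.find cb cur ≤ cb.length := PySem.Chars.find_le_length cb cur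
  rw [pv_filter_range_head _ (cb.length + 1) (PySem.Chars.find cb cur).toNat (by omega)
    (by simp [hpre]) (fun i hi => by simp [hmin i hi])]
  omega

lemma pv_singleton_prefix_iff (c : Char) (l : List Char) : [c] <+: l ↔ l[0]? = some c := by
  cases l with
  | nil => simp
  | cons x t => simp [List.cons_prefix_cons, eq_comm]

-- the position index holds exactly the occurrence positions of each character
lemma pv_index_getD (cb : List Char) (c : Char) :
    (pvBIndex cb).getD c [] = (List.range cb.length).filter (fun p => cb[p]? == some c) := by
  suffices h : ∀ (l : List Char) (d : PySem.Dict Char (List Nat)),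
      ((l.zipIdx.foldl (fun pos pc => pos.insert pc.1 (pos.getD pc.1 [] ++ [pc.2])) d).getD c [])
        = d.getD c [] ++ (List.range l.length).filter (fun p => l[p]? == some c) by
    have := h cb PySem.Dict.empty
    simpa [pvBIndex] using this
  intro l
  induction l using List.reverseRecOn with
  | nil => intro d; simp
  | append_singleton ys z ih =>
    intro d
    rw [List.zipIdx_append, List.foldl_append]
    simp only [List.zipIdx_singleton, List.foldl_cons, List.foldl_nil, Nat.zero_add]
    rw [List.length_append, List.length_singleton, List.range_succ, List.filter_append]
    have hcong : (List.range ys.length).filter (fun p => (ys ++ [z])[p]? == some c)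
        = (List.range ys.length).filter (fun p => ys[p]? == some c) := by
      refine List.filter_congr (fun p hp => ?_)
      rw [List.getElem?_append_left (List.mem_range.mp hp)]
    have hz : (ys ++ [z])[ys.length]? = some z := by
      rw [List.getElem?_append_right (le_refl _)]
      simp
    by_cases hcz : c = z
    · subst hcz
      rw [PySem.Dict.getD_insert_self, ih d, hcong]
      simp [hz]
    · rw [PySem.Dict.getD_insert_of_ne _ _ _ hcz, ih d, hcong]
      simp [hz, Ne.symm hcz]

-- the index seed equals the k = 0 occurrence filter over range (length + 1)
lemma pv_index_seed (cb : List Char) (c : Char) :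
    (pvBIndex cb).getD c []
      = (List.range (cb.length + 1)).filter (fun p => decide ([c] <+: cb.drop p)) := by
  rw [pv_index_getD, List.range_succ, List.filter_append]
  have h1 : ([c] <+: cb.drop cb.length) = False := by
    simp [List.drop_eq_nil_of_le (le_refl cb.length)]
  have h2 : ∀ p, decide ([c] <+: cb.drop p) = (cb[p]? == some c) := by
    intro p
    simp [pv_singleton_prefix_iff, List.getElem?_drop, Bool.beq_eq_decide_eq]
  simp only [h2]
  simp [h1]

-- the two per-character predicates filter the occurrence list identically
lemma pv_filter_pointwise (cb cur : List Char) (c : Char) (p : Nat) :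
    (decide (p + cur.length < cb.length) && (cb[p + cur.length]? == some c) && decide (cur <+: cb.drop p))
      = decide ((cur ++ [c]) <+: cb.drop p) := by
  by_cases hg : cb[p + cur.length]? = some c
  · obtain ⟨hlt, -⟩ := List.getElem?_eq_some_iff.mp hg
    simp [hlt, pv_append_prefix_iff, List.getElem?_drop, Bool.and_comm, Bool.beq_eq_decide_eq]
  · simp [hg, pv_append_prefix_iff, List.getElem?_drop]

-- one loop iteration preserves the invariant
lemma pv_step (cb : List Char) (a : List Char × List Char) (b : List Char × List Nat × Nat)
    (c : Char) (h : pvInv cb a b) :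
    pvInv cb (pvAStep cb a c) (pvBStep cb (pvBIndex cb) b c) := by
  obtain ⟨h1, h2, h3, h4⟩ := h
  have hnew : (if b.2.2 = 0 then (pvBIndex cb).getD c []
        else b.2.1.filter (fun p => decide (p + b.2.2 < cb.length) && (cb[p + b.2.2]? == some c)))
      = (List.range (cb.length + 1)).filter (fun p => decide ((a.2 ++ [c]) <+: cb.drop p)) := by
    by_cases hk : a.2 = []
    · rw [if_pos (by rw [h2, hk]; rfl), hk]
      simpa using pv_index_seed cb c
    · rw [if_neg (by rw [h2]; simpa using fun hl => hk (List.eq_nil_of_length_eq_zero hl)),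
        h3 hk, h2, List.filter_filter]
      exact List.filter_congr (fun p _ => pv_filter_pointwise cb a.2 c p)
  have hcond : ((if b.2.2 = 0 then (pvBIndex cb).getD c []
        else b.2.1.filter (fun p => decide (p + b.2.2 < cb.length) && (cb[p + b.2.2]? == some c))).isEmpty = false)
      ↔ PySem.Chars.isIn (a.2 ++ [c]) cb = true := by
    rw [hnew, List.isEmpty_eq_false_iff, pv_filter_range_ne_nil, PySem.Chars.isIn_iff_infix]
  simp only [pvAStep, pvBStep]
  by_cases hin : PySem.Chars.isIn (a.2 ++ [c]) cb = true
  · rw [if_pos hin, if_pos (hcond.mpr hin)]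
    refine ⟨h1, by simp [h2], fun _ => by simpa using hnew, Or.inr ?_⟩
    exact (PySem.Chars.isIn_iff_infix _ _).mp hin
  · rw [if_neg hin, if_neg (fun hc => hin (hcond.mp hc))]
    have hdl : PySem.List.slice (a.2 ++ [c]) none (some (-1)) = a.2 := by
      rw [PySem.List.slice_to_neg_one, List.dropLast_concat]
    have hidx : PySem.Chars.find cb a.2
        = (if b.2.2 = 0 then (0 : Int) else ((b.2.1.headD 0 : Nat) : Int)) := by
      by_cases hk : a.2 = []
      · rw [if_pos (by rw [h2, hk]; rfl), hk, PySem.Chars.find_nil]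
      · rw [if_neg (by rw [h2]; simpa using fun hl => hk (List.eq_nil_of_length_eq_zero hl)), h3 hk]
        exact pv_find_eq_head cb a.2 (h4.resolve_left hk)
    have hlen : ((a.2 ++ [c]).length : Int) - 1 = ((b.2.2 : Nat) : Int) := by
      simp [h2]
    refine ⟨?_, by simp, by simp, Or.inl rfl⟩
    rw [h1, hdl, hidx, hlen]

-- the fold preserves the invariant
lemma pv_fold (cb : List Char) (ms : List Char) :
    ∀ (a : List Char × List Char) (b : List Char × List Nat × Nat), pvInv cb a b →
      pvInv cb (ms.foldl (pvAStep cb) a) (ms.foldl (pvBStep cb (pvBIndex cb)) b) := by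
  induction ms with
  | nil => intro a b h; exact h
  | cons c ms ih => intro a b h; exact ih _ _ (pv_step cb a b c h)

-- ===== VERDICT (by name: the statement is the Claim_ definition above) =====
theorem substring_compress_aggressive_spec : Claim_equal_substring_compress_aggressive := by
  intro code_book message _
  unfold Spec_substring_compress_aggressive
  unfold substring_compress_aggressive substring_compress_aggressive_alt
  have hinit : pvInv code_book.toList ([], []) ([], [], 0) :=
    ⟨rfl, rfl, fun h => absurd rfl h, Or.inl rfl⟩
  obtain ⟨h1, h2, h3, h4⟩ := pv_fold code_book.toList message.toList _ _ hinit
  set sa := message.toList.foldl (pvAStep code_book.toList) ([], []) with hsa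
  set sb := message.toList.foldl (pvBStep code_book.toList (pvBIndex code_book.toList))
      ([], [], 0) with hsb
  simp only
  rw [h2]
  by_cases hp : sa.2.length > 0
  · rw [if_pos hp, if_pos hp, h1]
    have hne : sa.2 ≠ [] := fun h => by simp [h] at hp
    have hfind : PySem.Chars.find code_book.toList sa.2 = ((sb.2.1.headD 0 : Nat) : Int) := by
      rw [h3 hne]
      exact pv_find_eq_head code_book.toList sa.2 (h4.resolve_left hne)
    rw [hfind]
  · rw [if_neg hp, if_neg hp, h1]
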